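-- pv_equiv track=rewrite | github.com/aishg4075/bda-ia2-data-veracity-ingestion | src/ingestion_trust/winner_style.py | validate_split_integrity
-- ===== SOURCE A (Python) =====
-- from typing import Any, Dict, Iterable, List, Literal, Mapping, Sequence, Tuple
--
-- def validate_split_integrity(split_info: Mapping[str, Any]) -> Dict[str, int]:
--     train_set = set(int(i) for i in split_info.get("train_idx", []))
--     val_set = set(int(i) for i in split_info.get("val_idx", []))
--     test_set = set(int(i) for i in split_info.get("test_idx", []))
--     return {
--         "train_val": len(train_set.intersection(val_set)),
--         "train_test": len(train_set.intersection(test_set)),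
--         "val_test": len(val_set.intersection(test_set)),
--     }
-- ===== SOURCE B (Python) =====
-- def validate_split_integrity(split_info):
--     train = [int(i) for i in split_info.get("train_idx", [])]
--     val = [int(i) for i in split_info.get("val_idx", [])]
--     test = [int(i) for i in split_info.get("test_idx", [])]
--     tv = tt = vt = 0
--     seen = set()
--     for x in train + val + test:
--         if x not in seen:
--             seen.add(x)
--             a, b, c = x in train, x in val, x in test
--             if a and b:
--                 tv += 1
--             if a and c:
--                 tt += 1
--             if b and c:
--                 vt += 1
--     return {"train_val": tv, "train_test": tt, "val_test": vt}
-- ===== Notes on version B (the rewrite author's own statement) =====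
-- stated objective: alternative
-- what changed: B replaces the three sets and three pairwise set intersections by a single pass over the concatenated index lists with a seen-set for deduplication, classifying each distinct index into the three pair counters directly.
import Mathlib
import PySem

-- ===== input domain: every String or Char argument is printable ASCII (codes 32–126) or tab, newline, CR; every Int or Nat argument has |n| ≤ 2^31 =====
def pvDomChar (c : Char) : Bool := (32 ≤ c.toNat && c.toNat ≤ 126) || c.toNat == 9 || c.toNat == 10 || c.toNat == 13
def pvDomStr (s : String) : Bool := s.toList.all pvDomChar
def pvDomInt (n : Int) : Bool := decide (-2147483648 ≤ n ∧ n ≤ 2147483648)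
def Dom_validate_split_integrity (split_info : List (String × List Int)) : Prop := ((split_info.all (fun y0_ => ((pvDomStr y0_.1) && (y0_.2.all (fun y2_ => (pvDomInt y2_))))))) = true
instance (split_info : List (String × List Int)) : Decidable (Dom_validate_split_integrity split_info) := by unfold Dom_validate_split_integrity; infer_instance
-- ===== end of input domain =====

-- B replaces A's three sets + three pairwise intersections by one deduplicating pass over the
-- concatenated index lists with three pair counters (alternative decomposition, similar cost).

-- ===== PORT A =====
def validate_split_integrity (split_info : List (String × List Int)) : List (String × Int) :=
  let d := PySem.Dict.mk split_info
  -- int(i) on an int is the identity, so the generator maps each element to itself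
  let train_set : PySem.Set Int := PySem.Set.ofList ((d.getD "train_idx" []).map (fun i => i))
  let val_set : PySem.Set Int := PySem.Set.ofList ((d.getD "val_idx" []).map (fun i => i))
  let test_set : PySem.Set Int := PySem.Set.ofList ((d.getD "test_idx" []).map (fun i => i))
  [("train_val", PySem.Set.len (PySem.Set.inter train_set val_set)),
   ("train_test", PySem.Set.len (PySem.Set.inter train_set test_set)),
   ("val_test", PySem.Set.len (PySem.Set.inter val_set test_set))]

-- ===== PORT B =====
-- the loop body of Source B: state = (seen, tv, tt, vt)
def vsiStep (train val test : List Int)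
    (st : PySem.Set Int × Int × Int × Int) (x : Int) : PySem.Set Int × Int × Int × Int :=
  let (seen, tv, tt, vt) := st
  if x ∈ seen then st
  else
    let a := decide (x ∈ train)
    let b := decide (x ∈ val)
    let c := decide (x ∈ test)
    (PySem.Set.add seen x,
     tv + (if a && b then 1 else 0),
     tt + (if a && c then 1 else 0),
     vt + (if b && c then 1 else 0))

def validate_split_integrity_alt (split_info : List (String × List Int)) : List (String × Int) :=
  let d := PySem.Dict.mk split_info
  let train := (d.getD "train_idx" []).map (fun i => i)
  let val := (d.getD "val_idx" []).map (fun i => i)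
  let test := (d.getD "test_idx" []).map (fun i => i)
  let r := (train ++ val ++ test).foldl (vsiStep train val test) (PySem.Set.empty, 0, 0, 0)
  [("train_val", r.2.1), ("train_test", r.2.2.1), ("val_test", r.2.2.2)]

-- ===== PRECONDITION & SPEC =====
def Spec_validate_split_integrity (split_info : List (String × List Int)) (out : List (String × Int)) : Prop := out = validate_split_integrity_alt split_info
instance (split_info : List (String × List Int)) (out : List (String × Int)) : Decidable (Spec_validate_split_integrity split_info out) := by unfold Spec_validate_split_integrity; infer_instance

-- ===== CLAIM (what is proved, stated in full; the proofs are below) =====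
def Claim_equal_validate_split_integrity : Prop := ∀ (split_info : List (String × List Int)), Dom_validate_split_integrity split_info → Spec_validate_split_integrity split_info (validate_split_integrity split_info)

-- ===== LEMMAS AND PROOFS =====

-- number of distinct elements of L, outside `seen`, satisfying P
def vsiCnt (P : Int → Bool) (L : List Int) (seen : PySem.Set Int) : Int :=
  (((PySem.Set.ofList L).filter (fun x => decide (x ∉ seen) && P x)).length : Int)

theorem vsiCnt_cons_mem (P : Int → Bool) (x : Int) (L : List Int) (seen : PySem.Set Int)
    (hx : x ∈ seen) : vsiCnt P (x :: L) seen = vsiCnt P L seen := by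
  unfold vsiCnt
  rw [PySem.Set.ofList_cons]
  simp only [List.filter_cons]
  rw [if_neg (by simp [hx])]
  have : (PySem.Set.discard (PySem.Set.ofList L) x).filter (fun y => decide (y ∉ seen) && P y)
       = (PySem.Set.ofList L).filter (fun y => decide (y ∉ seen) && P y) := by
    show (List.filter _ (List.filter _ _)) = _
    rw [List.filter_filter]
    apply List.filter_congr
    intro y _
    by_cases hy : y = x
    · subst hy; simp [hx]
    · simp [hy]
  rw [this]

theorem vsiCnt_cons_not_mem (P : Int → Bool) (x : Int) (L : List Int) (seen : PySem.Set Int)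
    (hx : x ∉ seen) :
    vsiCnt P (x :: L) seen = (if P x then 1 else 0) + vsiCnt P L (PySem.Set.add seen x) := by
  unfold vsiCnt
  rw [PySem.Set.ofList_cons]
  simp only [List.filter_cons]
  have hdisc : (PySem.Set.discard (PySem.Set.ofList L) x).filter (fun y => decide (y ∉ seen) && P y)
       = (PySem.Set.ofList L).filter (fun y => decide (y ∉ PySem.Set.add seen x) && P y) := by
    show (List.filter _ (List.filter _ _)) = _
    rw [List.filter_filter]
    apply List.filter_congr
    intro y _
    by_cases hy : y = x
    · subst hy; simp [PySem.Set.mem_add]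
    · simp [hy, PySem.Set.mem_add]
  by_cases hP : P x = true
  · rw [if_pos (by simp [hx, hP]), hdisc]
    simp [hP]
    ring
  · rw [if_neg (by simp [hP]), hdisc]
    simp [hP]

-- loop invariant for Source B's single pass
theorem vsiLoop_spec (train val test : List Int) (L : List Int)
    (seen : PySem.Set Int) (tv tt vt : Int) :
    (L.foldl (vsiStep train val test) (seen, tv, tt, vt)).2 =
      (tv + vsiCnt (fun x => decide (x ∈ train) && decide (x ∈ val)) L seen,
       tt + vsiCnt (fun x => decide (x ∈ train) && decide (x ∈ test)) L seen,
       vt + vsiCnt (fun x => decide (x ∈ val) && decide (x ∈ test)) L seen) := by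
  induction L generalizing seen tv tt vt with
  | nil => simp [vsiCnt, PySem.Set.ofList]
  | cons x L ih =>
    simp only [List.foldl_cons]
    by_cases hx : x ∈ seen
    · rw [show vsiStep train val test (seen, tv, tt, vt) x = (seen, tv, tt, vt) by
        simp [vsiStep, hx]]
      rw [ih, vsiCnt_cons_mem _ _ _ _ hx, vsiCnt_cons_mem _ _ _ _ hx, vsiCnt_cons_mem _ _ _ _ hx]
    · rw [show vsiStep train val test (seen, tv, tt, vt) x =
        (PySem.Set.add seen x,
         tv + (if decide (x ∈ train) && decide (x ∈ val) then 1 else 0),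
         tt + (if decide (x ∈ train) && decide (x ∈ test) then 1 else 0),
         vt + (if decide (x ∈ val) && decide (x ∈ test) then 1 else 0)) by
        simp [vsiStep, hx]]
      rw [ih, vsiCnt_cons_not_mem _ _ _ _ hx, vsiCnt_cons_not_mem _ _ _ _ hx,
        vsiCnt_cons_not_mem _ _ _ _ hx]
      refine Prod.ext ?_ (Prod.ext ?_ ?_) <;> simp <;> ring

-- the count of distinct elements of A++B++C in two of the lists equals the corresponding
-- intersection size, because both filtered lists are Nodup with the same members
theorem vsiCnt_eq_inter_len (s t : List Int) (L : List Int)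
    (hs : ∀ x, x ∈ s → x ∈ L) :
    vsiCnt (fun x => decide (x ∈ s) && decide (x ∈ t)) L PySem.Set.empty =
      PySem.Set.len (PySem.Set.inter (PySem.Set.ofList s) (PySem.Set.ofList t)) := by
  unfold vsiCnt PySem.Set.len
  congr 1
  apply List.Perm.length_eq
  apply (List.perm_ext_iff_of_nodup _ _).2
  · intro x
    show x ∈ List.filter _ _ ↔ x ∈ List.filter _ _
    simp only [List.mem_filter, PySem.Set.mem_ofList, Bool.and_eq_true, decide_eq_true_eq,
      PySem.Set.contains_eq_listContains, List.contains_iff_mem, PySem.Set.empty,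
      List.not_mem_nil, not_false_eq_true, true_and]
    constructor
    · rintro ⟨-, hxs, hxt⟩
      exact ⟨hxs, hxt⟩
    · rintro ⟨hxs, hxt⟩
      exact ⟨hs x hxs, hxs, hxt⟩
  · exact (PySem.Set.nodup_ofList L).filter _
  · exact (PySem.Set.nodup_ofList s).filter _

-- ===== VERDICT (by name: the statement is the Claim_ definition above) =====
theorem validate_split_integrity_spec : Claim_equal_validate_split_integrity := by
  intro split_info _
  show validate_split_integrity split_info = validate_split_integrity_alt split_info
  unfold validate_split_integrity validate_split_integrity_alt
  simp only [List.map_id_fun', id]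
  set train := (PySem.Dict.mk split_info).getD "train_idx" [] with htr
  set val := (PySem.Dict.mk split_info).getD "val_idx" [] with hv
  set test := (PySem.Dict.mk split_info).getD "test_idx" [] with hte
  rw [vsiLoop_spec]
  have hL : ∀ x : Int, x ∈ train → x ∈ train ++ val ++ test := by intro x hx; simp [hx]
  have hLv : ∀ x : Int, x ∈ val → x ∈ train ++ val ++ test := by intro x hx; simp [hx]
  rw [vsiCnt_eq_inter_len train val _ hL, vsiCnt_eq_inter_len train test _ hL,
    vsiCnt_eq_inter_len val test _ hLv]
  simp
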